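-- pv_equiv track=rewrite | github.com/himanshupant94/projects | data-structure/recursion/phrase-in-list.py | stringinlist
-- ===== SOURCE A (Python) =====
-- def stringinlist(string,word_list,output=None):
--     if output is None:
--         output=[]
--
--     for word in word_list:
--         if string.startswith(word):
--             output.append(word)
--             print (output)
--             stringinlist(string[len(word):],word_list,output)
--
--     return output
-- ===== SOURCE B (Python) =====
-- def stringinlist(string, word_list, output=None):
--     # Iterative derecursivization: an explicit stack of (remaining string, words still
--     # to try in that frame) simulates A's call frames; same appends/prints, same order.
--     # Like A, mutates a caller-passed `output` list in place and returns it.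
--     if output is None:
--         output = []
--     stack = [(string, word_list)]
--     while stack:
--         s, ws = stack.pop()
--         if not ws:
--             continue
--         w = ws[0]
--         if s.startswith(w):
--             output.append(w)
--             print(output)
--             stack.append((s, ws[1:]))
--             stack.append((s[len(w):], word_list))
--         else:
--             stack.append((s, ws[1:]))
--     return output
-- ===== Notes on version B (the rewrite author's own statement) =====
-- stated objective: alternative
-- what changed: Replaced A's recursion (a recursive call per matched prefix inside a for-loop) by an iterative while-loop over an explicit stack of (remaining string, words still to try) frames, preserving the append/print order; Pre_ excludes '' in word_list, where A raises RecursionError (and B loops).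
import Mathlib
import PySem

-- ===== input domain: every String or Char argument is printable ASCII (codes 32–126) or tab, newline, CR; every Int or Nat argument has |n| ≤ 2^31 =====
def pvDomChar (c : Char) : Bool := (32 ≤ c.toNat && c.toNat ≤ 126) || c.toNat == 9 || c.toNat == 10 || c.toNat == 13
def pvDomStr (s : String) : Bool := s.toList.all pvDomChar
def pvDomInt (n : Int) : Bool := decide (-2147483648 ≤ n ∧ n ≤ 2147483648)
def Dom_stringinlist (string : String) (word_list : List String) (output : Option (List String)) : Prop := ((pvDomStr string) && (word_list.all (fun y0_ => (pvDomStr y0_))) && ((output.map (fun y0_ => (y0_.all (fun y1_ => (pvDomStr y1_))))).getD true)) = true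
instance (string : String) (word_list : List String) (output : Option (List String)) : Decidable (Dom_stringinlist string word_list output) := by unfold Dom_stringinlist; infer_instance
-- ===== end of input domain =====

-- B replaces A's recursion by an explicit stack of (remaining string, words still to try)
-- frames (same matches, same order); equivalence is about the RETURN value only (the Python
-- functions also mutate a caller-passed `output` list and print — identically in A and B).

-- ===== PORT A =====
-- A's recursion, on the code points of the string; the `for word in word_list` loop is the
-- structural recursion on `ws`, with `out` the shared output list and `wl` the full word list
-- used by the recursive call. `s.drop w.toList.length` is Python's `string[len(word):]`
-- (exact: the slice lower bound len(word) is ≥ 0, cf. PySem.Chars.slice_from_natCast).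
-- The `w.toList.length = 0` guard only makes the definition total: there Python A never
-- returns (infinite recursion, RecursionError) — such inputs are excluded by Pre_.
def slA (wl : List String) : List Char → List String → List String → List String
  | _, [], out => out
  | s, w :: ws, out =>
    if h : PySem.Chars.startswith s w.toList then
      -- out ++ [w] is output.append(word); print(output) is a side effect, not the value
      if hw : w.toList.length = 0 then slA wl s ws (out ++ [w])
      else slA wl s ws (slA wl (s.drop w.toList.length) wl (out ++ [w]))
    else slA wl s ws out
  termination_by s ws _ => (s.length, ws.length)
  decreasing_by
    · apply Prod.Lex.right; simp
    · apply Prod.Lex.left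
      have hle := (PySem.Chars.startswith_iff s w.toList).mp h |>.length_le
      simp only [List.length_drop]
      omega
    · apply Prod.Lex.right; simp
    · apply Prod.Lex.right; simp

def stringinlist (string : String) (word_list : List String) (output : Option (List String)) : List String :=
  slA word_list string.toList word_list (output.getD [])

-- ===== PORT B =====
-- the termination measure of B's while-loop: one unit per frame plus, per frame (s, ws),
-- ws.length * (n+2)^(length of s), n the word-list length
def slBMeasure (n : Nat) (stack : List (List Char × List String)) : Nat :=
  stack.foldr (fun f acc => 1 + f.2.length * (n + 2) ^ f.1.length + acc) 0

-- B's while-loop over the explicit stack: `match` on the stack is `stack.pop()` (head = top),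
-- the conses are the two `stack.append`s (child frame on top). Guard `w.toList.length = 0`
-- as in slA: there Python B loops forever; excluded by Pre_.
def slB (wl : List String) : List (List Char × List String) → List String → List String
  | [], out => out
  | (_, []) :: rest, out => slB wl rest out
  | (s, w :: ws) :: rest, out =>
    if h : PySem.Chars.startswith s w.toList then
      let out1 := out ++ [w]
      -- print(output): side effect, not part of the return value
      if hw : w.toList.length = 0 then slB wl ((s, ws) :: rest) out1
      else slB wl ((s.drop w.toList.length, wl) :: (s, ws) :: rest) out1
    else slB wl ((s, ws) :: rest) out
  termination_by stack _ => slBMeasure wl.length stack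
  decreasing_by
    · simp only [slBMeasure, List.foldr_cons, List.length_nil]
      omega
    · -- no push (empty matched word): the frame loses one pending word
      simp only [slBMeasure, List.foldr_cons, List.length_cons]
      have hX : 0 < (wl.length + 2) ^ s.length := Nat.pow_pos (by omega)
      have hmul : (ws.length + 1) * (wl.length + 2) ^ s.length
          = ws.length * (wl.length + 2) ^ s.length + (wl.length + 2) ^ s.length := by ring
      omega
    · -- push: the child frame's potential is < (n+2)^|s|, and the parent loses (n+2)^|s|
      simp only [slBMeasure, List.foldr_cons, List.length_cons, List.length_drop]
      have hle := (PySem.Chars.startswith_iff s w.toList).mp h |>.length_le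
      have hL : 1 ≤ s.length := by omega
      have hpow : (wl.length + 2) ^ (s.length - w.toList.length) ≤ (wl.length + 2) ^ (s.length - 1) :=
        Nat.pow_le_pow_right (by omega) (by omega)
      have hsplit : (wl.length + 2) ^ s.length = (wl.length + 2) ^ (s.length - 1) * (wl.length + 2) := by
        conv_lhs => rw [show s.length = (s.length - 1) + 1 by omega]
        rw [pow_succ]
      have hX : 0 < (wl.length + 2) ^ (s.length - 1) := Nat.pow_pos (by omega)
      nlinarith [hpow, hsplit, hX]
    · simp only [slBMeasure, List.foldr_cons, List.length_cons]
      have hX : 0 < (wl.length + 2) ^ s.length := Nat.pow_pos (by omega)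
      have hmul : (ws.length + 1) * (wl.length + 2) ^ s.length
          = ws.length * (wl.length + 2) ^ s.length + (wl.length + 2) ^ s.length := by ring
      omega

def stringinlist_alt (string : String) (word_list : List String) (output : Option (List String)) : List String :=
  slB word_list [(string.toList, word_list)] (output.getD [])

-- ===== PRECONDITION & SPEC =====
-- Pre_ excludes word lists containing the empty word: on those Python A never returns
-- (the empty word matches any string, so the recursion is infinite: RecursionError),
-- and Python B loops forever there too.
def Pre_stringinlist (string : String) (word_list : List String) (output : Option (List String)) : Prop :=
  "" ∉ word_list
instance (string : String) (word_list : List String) (output : Option (List String)) : Decidable (Pre_stringinlist string word_list output) := by unfold Pre_stringinlist; infer_instance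

def pvWitness_stringinlist : String × List String × Option (List String) := ("abcab", ["ab", "c"], none)

def Spec_stringinlist (string : String) (word_list : List String) (output : Option (List String)) (out : List String) : Prop := out = stringinlist_alt string word_list output
instance (string : String) (word_list : List String) (output : Option (List String)) (out : List String) : Decidable (Spec_stringinlist string word_list output out) := by unfold Spec_stringinlist; infer_instance

-- ===== CLAIM (what is proved, stated in full; the proofs are below) =====
def Claim_equal_stringinlist : Prop := ∀ (string : String) (word_list : List String) (output : Option (List String)), Dom_stringinlist string word_list output → Pre_stringinlist string word_list output → Spec_stringinlist string word_list output (stringinlist string word_list output)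

-- ===== LEMMAS AND PROOFS =====

-- processing one frame (s, ws) of the stack and then the rest equals first running A's
-- loop body on (s, ws) (which produces slA's output) and then the rest of the stack
theorem slB_frame (wl : List String) (s : List Char) (ws : List String) (out : List String) :
    ∀ rest, slB wl ((s, ws) :: rest) out = slB wl rest (slA wl s ws out) := by
  fun_induction slA wl s ws out with
  | case1 s out => intro rest; rw [slB]
  | case2 s w ws out h hw ih =>
      intro rest
      rw [slB]
      simp only [h, hw, dif_pos]
      exact ih rest
  | case3 s w ws out h hw ih1 ih2 =>
      intro rest
      rw [slB]
      simp only [slA, h, dif_pos, hw, dif_neg, not_false_iff]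
      rw [ih1, ih2]
  | case4 s w ws out h ih =>
      intro rest
      rw [slB]
      simp only [slA, h]
      exact ih rest

-- ===== VERDICT (by name: the statement is the Claim_ definition above) =====
theorem stringinlist_spec : Claim_equal_stringinlist := by
  intro s wl out _ _
  unfold Spec_stringinlist stringinlist stringinlist_alt
  rw [slB_frame]
  rw [slB]
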